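-- pv_equiv track=rewrite | github.com/snelgrove1/Assignment-1 | Class Work/count_observ.py | count_observations
-- ===== SOURCE A (Python) =====
-- def count_observations(lines):
--     counts = []
--     current = 0
--     for line in lines:
--         line = line.strip()
--         if line == '':
--             counts.append(current)
--             current = 0
--         else:
--             current += 1
--     return counts
-- ===== SOURCE B (Python) =====
-- def count_observations(lines):
--     blank_idx = [i for i, line in enumerate(lines) if line.strip() == '']
--     out = []
--     prev = -1
--     for i in blank_idx:
--         out.append(i - prev - 1)
--         prev = i
--     return out
-- ===== Notes on version B (the rewrite author's own statement) =====
-- stated objective: alternative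
-- what changed: Instead of carrying a running counter reset at each blank line, B first collects the indices of all blank (strip()-empty) lines and emits successive index differences (with sentinel -1), which equal the group sizes.
import Mathlib
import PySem

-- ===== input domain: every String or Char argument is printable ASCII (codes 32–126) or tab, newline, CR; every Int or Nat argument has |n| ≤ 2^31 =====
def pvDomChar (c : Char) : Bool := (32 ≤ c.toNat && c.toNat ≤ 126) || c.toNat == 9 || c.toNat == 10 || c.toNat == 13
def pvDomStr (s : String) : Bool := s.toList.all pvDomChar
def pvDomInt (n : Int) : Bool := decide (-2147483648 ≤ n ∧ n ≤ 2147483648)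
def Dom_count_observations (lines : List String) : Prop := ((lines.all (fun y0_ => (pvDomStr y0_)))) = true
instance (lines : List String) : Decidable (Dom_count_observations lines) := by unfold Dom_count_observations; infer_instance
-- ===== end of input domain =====

-- B replaces A's running counter (reset at each blank line) by collecting blank-line
-- indices and emitting successive differences; alternative decomposition, same cost.

-- ===== PORT A =====
def count_observations (lines : List String) : List Int :=
  (lines.foldl
    (fun (st : List Int × Int) line =>
      let l := PySem.Str.strip line
      if l == "" then (st.1 ++ [st.2], 0) else (st.1, st.2 + 1))
    ([], 0)).1

-- ===== PORT B =====
def pvDiffs : Int → List Int → List Int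
  | _, [] => []
  | prev, i :: is => (i - prev - 1) :: pvDiffs i is

def count_observations_alt (lines : List String) : List Int :=
  let blank_idx := ((PySem.List.enumerate lines 0).filter
      (fun p => PySem.Str.strip p.2 == "")).map (·.1)
  pvDiffs (-1) blank_idx

-- ===== PRECONDITION & SPEC =====
def Spec_count_observations (lines : List String) (out : List Int) : Prop := out = count_observations_alt lines
instance (lines : List String) (out : List Int) : Decidable (Spec_count_observations lines out) := by unfold Spec_count_observations; infer_instance

-- ===== CLAIM (what is proved, stated in full; the proofs are below) =====
def Claim_equal_count_observations : Prop := ∀ (lines : List String), Dom_count_observations lines → Spec_count_observations lines (count_observations lines)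

-- ===== LEMMAS AND PROOFS =====
theorem count_observations_fold_eq (ls : List String) :
    ∀ (acc : List Int) (cur k prev : Int), cur = k - 1 - prev →
    (ls.foldl
      (fun (st : List Int × Int) line =>
        let l := PySem.Str.strip line
        if l == "" then (st.1 ++ [st.2], 0) else (st.1, st.2 + 1))
      (acc, cur)).1
    = acc ++ pvDiffs prev (((PySem.List.enumerate ls k).filter
        (fun p => PySem.Str.strip p.2 == "")).map (·.1)) := by
  induction ls with
  | nil => intro acc cur k prev h; simp [PySem.List.enumerate_nil, pvDiffs]
  | cons l ls ih =>
    intro acc cur k prev h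
    simp only [List.foldl_cons, PySem.List.enumerate_cons, List.filter_cons]
    by_cases hb : PySem.Str.strip l == ""
    · simp only [hb, if_pos, List.map_cons, pvDiffs]
      rw [ih (acc ++ [cur]) 0 (k + 1) k (by ring), List.append_assoc]
      simp [h]
      ring_nf
    · simp only [hb, if_neg, Bool.false_eq_true, not_false_iff]
      rw [ih acc (cur + 1) (k + 1) prev (by omega)]

-- ===== VERDICT (by name: the statement is the Claim_ definition above) =====
theorem count_observations_spec : Claim_equal_count_observations := by
  intro lines _
  unfold Spec_count_observations count_observations count_observations_alt
  rw [count_observations_fold_eq lines [] 0 0 (-1) (by ring)]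
  simp
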